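-- pv_equiv track=rewrite | github.com/mit1280/primelibpy | Prime.py | getCousinPrime
-- ===== SOURCE A (Python) =====
-- def getCousinPrime(startLimit,endLimit):
--     l1=[]
--     p,r=startLimit,endLimit
--     if p==1:
--         p=2
--     x=''
--     y=''
--     #this is exception so we have to print explicitly
--     q=[]
--     if p<4 and r>6:
--         q.append(3)
--         q.append(7)
--         l1.append(q)
--     for a in range(p,r+1):
--         k=0
--         q=[]
--         for i in range(2,int(a/2)+1):
--             if(a%i==0):
--                 k=k+1
--                 break
--         if(k<=0):
--             if(x==''):
--                 x=int(a)
--                 continue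
--             if(y==''):
--                 y=int(a)
--                 if((y-x)==4):
--                     q.append(x)
--                     q.append(y)
--                     l1.append(q)
--             else:
--                 x=y
--                 y=a
--                 if((y-x)==4):
--                     q.append(x)
--                     q.append(y)
--                     l1.append(q)
--     return(l1)
-- ===== SOURCE B (Python) =====
-- def getCousinPrime(startLimit, endLimit):
--     p = 2 if startLimit == 1 else startLimit
--     r = endLimit
--     result = [[3, 7]] if p < 4 and r > 6 else []
--     if r < 2 or max(p, 2) > r:
--         return result
--     size = r + 1
--     sieve = [True] * size
--     for i in range(2, size):
--         for j in range(2 * i, size, i):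
--             sieve[j] = False
--     primes = [n for n in range(max(p, 2), size) if sieve[n]]
--     result.extend([a, b] for a, b in zip(primes, primes[1:]) if b - a == 4)
--     return result
-- ===== Notes on version B (the rewrite author's own statement) =====
-- stated objective: alternative
-- what changed: Replaces A's per-number trial division up to a/2 with an inner break plus an x/y state machine by a sieve of multiples over [0, endLimit] followed by a zip over consecutive surviving numbers to collect gap-4 pairs (same [3,7] special case, early return when the scan range is empty).
import Mathlib
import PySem

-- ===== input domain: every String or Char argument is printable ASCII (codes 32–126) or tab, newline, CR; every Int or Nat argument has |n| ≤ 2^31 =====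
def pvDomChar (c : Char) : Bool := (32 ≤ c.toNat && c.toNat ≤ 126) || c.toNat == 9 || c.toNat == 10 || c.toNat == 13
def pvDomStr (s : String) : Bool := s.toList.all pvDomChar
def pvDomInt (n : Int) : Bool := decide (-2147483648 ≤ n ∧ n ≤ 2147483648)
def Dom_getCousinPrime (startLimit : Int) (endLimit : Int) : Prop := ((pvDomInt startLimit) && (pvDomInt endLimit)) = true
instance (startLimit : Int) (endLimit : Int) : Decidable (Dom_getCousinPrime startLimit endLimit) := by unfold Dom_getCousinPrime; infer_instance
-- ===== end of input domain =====

-- B replaces A's per-number trial division and x/y state machine by a sieve of multiples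
-- plus a zip over consecutive sieve survivors (a different algorithm; equal return value).


-- ===== PORT A =====
-- inner loop 'for i in range(2, int(a/2)+1): if a%i==0: k=k+1; break' — returns final k (0 or 1)
def pvTrialA (a : Int) : List Int → Int
  | [] => 0
  | i :: rest => if PySem.Int.mod a i = 0 then 1 else pvTrialA a rest

-- one iteration of A's main loop; state = (x, y, l1), '' modelled as none
def pvStepA (st : Option Int × Option Int × List (List Int)) (a : Int) :
    Option Int × Option Int × List (List Int) :=
  let k := pvTrialA a (PySem.List.pyRange 2 (PySem.Int.truncdiv a 2 + 1) 1)
  if k ≤ 0 then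
    match st with
    | (none, y, l1) => (some a, y, l1)                         -- x == '': x = int(a); continue
    | (some x, none, l1) =>                                    -- y == '': y = int(a); test gap
        if a - x = 4 then (some x, some a, l1 ++ [[x, a]]) else (some x, some a, l1)
    | (some _, some y, l1) =>                                  -- else: x = y; y = a; test gap
        if a - y = 4 then (some y, some a, l1 ++ [[y, a]]) else (some y, some a, l1)
  else st

def getCousinPrime (startLimit : Int) (endLimit : Int) : List (List Int) :=
  let p := if startLimit = 1 then 2 else startLimit
  let r := endLimit
  let l1 : List (List Int) := if p < 4 ∧ r > 6 then [[3, 7]] else []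
  ((PySem.List.pyRange p (r + 1) 1).foldl pvStepA (none, none, l1)).2.2

-- ===== PORT B =====
-- sieve[j] = False for every multiple j = i*k (k ≥ 2) up to r; indices are ≥ 4 ≥ 0, so .toNat is exact
def pvSieveB (r : Int) : Array Bool :=
  let size := r + 1
  (PySem.List.pyRange 2 size 1).foldl
    (fun sv i => (PySem.List.pyRange (2 * i) size i).foldl (fun s j => s.setIfInBounds j.toNat false) sv)
    (Array.replicate size.toNat true)

-- '[[a, b] for a, b in zip(primes, primes[1:]) if b - a == 4]'
def pvPairsB (primes : List Int) : List (List Int) :=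
  ((primes.zip primes.tail).filter (fun q => q.2 - q.1 = 4)).map (fun q => [q.1, q.2])

def getCousinPrime_alt (startLimit : Int) (endLimit : Int) : List (List Int) :=
  let p := if startLimit = 1 then 2 else startLimit
  let r := endLimit
  let res : List (List Int) := if p < 4 ∧ r > 6 then [[3, 7]] else []
  if r < 2 ∨ max p 2 > r then res
  else
    let sieve := pvSieveB r
    -- sieve[n]: 2 ≤ n ≤ r so the index is in range; List.getD with default false is exact here
    let primes := (PySem.List.pyRange (max p 2) (r + 1) 1).filter (fun n => sieve.getD n.toNat false)
    res ++ pvPairsB primes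

-- ===== PRECONDITION & SPEC =====
def Spec_getCousinPrime (startLimit : Int) (endLimit : Int) (out : List (List Int)) : Prop := out = getCousinPrime_alt startLimit endLimit
instance (startLimit : Int) (endLimit : Int) (out : List (List Int)) : Decidable (Spec_getCousinPrime startLimit endLimit out) := by unfold Spec_getCousinPrime; infer_instance

-- ===== CLAIM (what is proved, stated in full; the proofs are below) =====
def Claim_equal_getCousinPrime : Prop := ∀ (startLimit : Int) (endLimit : Int), Dom_getCousinPrime startLimit endLimit → Spec_getCousinPrime startLimit endLimit (getCousinPrime startLimit endLimit)

-- ===== LEMMAS AND PROOFS =====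

-- A's "no small divisor" test as a Bool predicate
def pvIsP (a : Int) : Bool :=
  decide (pvTrialA a (PySem.List.pyRange 2 (PySem.Int.truncdiv a 2 + 1) 1) ≤ 0)

-- gap-4 pairs of consecutive elements
def pvPairs : List Int → List (List Int)
  | x :: y :: t => (if y - x = 4 then [[x, y]] else []) ++ pvPairs (y :: t)
  | _ => []

theorem pvTrialA_le_zero_iff (a : Int) (l : List Int) :
    pvTrialA a l ≤ 0 ↔ ∀ i ∈ l, PySem.Int.mod a i ≠ 0 := by
  induction l with
  | nil => simp [pvTrialA]
  | cons i t ih =>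
      simp only [pvTrialA, List.mem_cons]
      by_cases h : PySem.Int.mod a i = 0 <;> simp [h, ih]

theorem pvIsP_iff (a : Int) :
    pvIsP a = true ↔ ∀ i : Int, 2 ≤ i → i < PySem.Int.truncdiv a 2 + 1 → ¬ i ∣ a := by
  simp only [pvIsP, decide_eq_true_eq, pvTrialA_le_zero_iff]
  constructor
  · intro h i h2 hlt hdvd
    exact h i (by rw [PySem.List.mem_pyRange_one]; omega)
      ((PySem.Int.mod_eq_zero_iff_dvd a i).mpr hdvd)
  · intro h i hmem hmod
    rw [PySem.List.mem_pyRange_one] at hmem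
    exact h i hmem.1 hmem.2 ((PySem.Int.mod_eq_zero_iff_dvd a i).mp hmod)

theorem pvIsP_of_le_three (a : Int) (h : a ≤ 3) : pvIsP a = true := by
  rw [pvIsP_iff]
  intro i h2 hlt
  exfalso
  have : PySem.Int.truncdiv a 2 ≤ 1 := by
    by_cases h0 : 0 ≤ a
    · simp only [PySem.Int.truncdiv, Int.tdiv_eq_ediv_of_nonneg h0]; omega
    · have h1 := Int.tdiv_le_tdiv (a := a) (b := 0) (c := 2) (by norm_num) (by omega)
      rw [Int.zero_tdiv] at h1
      simp only [PySem.Int.truncdiv]; omega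
  omega

-- the loop body ignores non-"prime" elements: fold over l = fold over (l.filter pvIsP)
theorem foldA_filter (l : List Int) (st : Option Int × Option Int × List (List Int)) :
    l.foldl pvStepA st = (l.filter pvIsP).foldl pvStepA st := by
  induction l generalizing st with
  | nil => rfl
  | cons a t ih =>
      by_cases h : pvIsP a = true
      · simp [h, List.foldl_cons, ih]
      · have hk : ¬ pvTrialA a (PySem.List.pyRange 2 (PySem.Int.truncdiv a 2 + 1) 1) ≤ 0 := by
          simpa [pvIsP] using h
        simp [h, List.foldl_cons, pvStepA, hk, ih]

-- on a list of "primes" only, the fold produces the consecutive gap-4 pairs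
theorem foldA_pairs_two (F : List Int) (hF : ∀ a ∈ F, pvIsP a = true) :
    ∀ (x y : Int) (acc : List (List Int)),
      (F.foldl pvStepA (some x, some y, acc)).2.2 = acc ++ pvPairs (y :: F) := by
  induction F with
  | nil => intro x y acc; simp [pvPairs]
  | cons a t ih =>
      intro x y acc
      have ha : pvTrialA a (PySem.List.pyRange 2 (PySem.Int.truncdiv a 2 + 1) 1) ≤ 0 := by
        have := hF a (List.mem_cons_self ..); simpa [pvIsP] using this
      have ht : ∀ b ∈ t, pvIsP b = true := fun b hb => hF b (List.mem_cons_of_mem _ hb)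
      simp only [List.foldl_cons, pvStepA, if_pos ha]
      by_cases hgap : a - y = 4
      · simp [ih ht, pvPairs, show y + 4 - y = 4 by omega, show a = y + 4 by omega]
      · simp [hgap, ih ht, pvPairs]

theorem foldA_pairs_one (F : List Int) (hF : ∀ a ∈ F, pvIsP a = true) :
    ∀ (x : Int) (acc : List (List Int)),
      (F.foldl pvStepA (some x, none, acc)).2.2 = acc ++ pvPairs (x :: F) := by
  induction F with
  | nil => intro x acc; simp [pvPairs]
  | cons a t _ =>
      intro x acc
      have ha : pvTrialA a (PySem.List.pyRange 2 (PySem.Int.truncdiv a 2 + 1) 1) ≤ 0 := by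
        have := hF a (List.mem_cons_self ..); simpa [pvIsP] using this
      have ht : ∀ b ∈ t, pvIsP b = true := fun b hb => hF b (List.mem_cons_of_mem _ hb)
      simp only [List.foldl_cons, pvStepA, if_pos ha]
      by_cases hgap : a - x = 4
      · simp [hgap, foldA_pairs_two t ht, pvPairs]
      · simp [hgap, foldA_pairs_two t ht, pvPairs]

theorem foldA_pairs (F : List Int) (hF : ∀ a ∈ F, pvIsP a = true) (acc : List (List Int)) :
    (F.foldl pvStepA (none, none, acc)).2.2 = acc ++ pvPairs F := by
  cases F with
  | nil => simp [pvPairs]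
  | cons a t =>
      have ha : pvTrialA a (PySem.List.pyRange 2 (PySem.Int.truncdiv a 2 + 1) 1) ≤ 0 := by
        have := hF a (List.mem_cons_self ..); simpa [pvIsP] using this
      have ht : ∀ b ∈ t, pvIsP b = true := fun b hb => hF b (List.mem_cons_of_mem _ hb)
      simp only [List.foldl_cons, pvStepA, if_pos ha]
      exact foldA_pairs_one t ht a acc

-- A's whole result, in closed form
theorem getCousinPrime_eq (s e : Int) :
    getCousinPrime s e =
      (if (if s = 1 then 2 else s) < 4 ∧ e > 6 then [[3, 7]] else [])
        ++ pvPairs ((PySem.List.pyRange (if s = 1 then 2 else s) (e + 1) 1).filter pvIsP) := by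
  show ((PySem.List.pyRange (if s = 1 then 2 else s) (e + 1) 1).foldl pvStepA
      (none, none, if (if s = 1 then 2 else s) < 4 ∧ e > 6 then [[3, 7]] else [])).2.2 = _
  rw [foldA_filter]
  exact foldA_pairs _ (by simp) _

-- B's zip/filter/map computes pvPairs
theorem pvPairsB_eq (F : List Int) : pvPairsB F = pvPairs F := by
  induction F with
  | nil => rfl
  | cons a t ih =>
      cases t with
      | nil => rfl
      | cons b u =>
          simp only [pvPairsB, List.tail_cons, List.zip_cons_cons, List.filter_cons] at *
          by_cases h : b - a = 4 <;> simp [h, pvPairs, ← ih]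

-- a run of consecutive integers contains no gap-4 pair
theorem pvPairs_pyRange (n : Nat) : ∀ a b : Int, (b - a).toNat = n → pvPairs (PySem.List.pyRange a b 1) = [] := by
  induction n with
  | zero =>
      intro a b h
      rw [PySem.List.pyRange_one_eq_nil (by omega)]; rfl
  | succ n ih =>
      intro a b h
      rw [PySem.List.pyRange_one_cons (by omega)]
      rcases Nat.eq_zero_or_pos n with hn | hn
      · rw [PySem.List.pyRange_one_eq_nil (by omega)]; rfl
      · rw [PySem.List.pyRange_one_cons (by omega), pvPairs,
          ← PySem.List.pyRange_one_cons (by omega : a + 1 < b)]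
        simp [ih (a + 1) b (by omega)]

-- prepending the run a..1 (all "prime" for A) to a list starting at 2 adds no pair
theorem pvPairs_junction (n : Nat) : ∀ (a : Int) (t : List Int), (2 - a).toNat = n →
    pvPairs (PySem.List.pyRange a 2 1 ++ 2 :: t) = pvPairs (2 :: t) := by
  induction n with
  | zero =>
      intro a t h
      rw [PySem.List.pyRange_one_eq_nil (by omega)]; rfl
  | succ n ih =>
      intro a t h
      rw [PySem.List.pyRange_one_cons (by omega)]
      rcases Nat.eq_zero_or_pos n with hn | hn
      · rw [PySem.List.pyRange_one_eq_nil (by omega)]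
        have ha : a = 1 := by omega
        subst ha
        simp [pvPairs]
      · rw [PySem.List.pyRange_one_cons (by omega : a + 1 < 2), List.cons_append, List.cons_append,
          pvPairs]
        rw [← List.cons_append, ← PySem.List.pyRange_one_cons (by omega : a + 1 < 2)]
        simp [ih (a + 1) t (by omega)]

-- ---- sieve characterisation ----

theorem pvSetFold (l : List Int) (hl : ∀ j ∈ l, 0 ≤ j) (sv : Array Bool) (n : Nat) :
    (l.foldl (fun s j => s.setIfInBounds j.toNat false) sv).getD n false
      = (sv.getD n false && !(decide ((n : Int) ∈ l))) := by
  induction l generalizing sv with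
  | nil => simp
  | cons j t ih =>
      have hj : 0 ≤ j := hl j (List.mem_cons_self ..)
      have ht : ∀ x ∈ t, 0 ≤ x := fun x hx => hl x (List.mem_cons_of_mem _ hx)
      simp only [List.foldl_cons, ih ht]
      have hset : (sv.setIfInBounds j.toNat false).getD n false = (sv.getD n false && !(decide ((n : Int) = j))) := by
        simp only [Array.getD_eq_getD_getElem?, Array.getElem?_setIfInBounds]
        by_cases hje : j.toNat = n
        · have : (n : Int) = j := by omega
          by_cases hlen : j.toNat < sv.size
          · have hn : n < sv.size := hje ▸ hlen
            simp [hje, this, hn]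
          · have hn : ¬ n < sv.size := hje ▸ hlen
            simp [hje, this, hn]
        · have : ¬ ((n : Int) = j) := by omega
          simp [hje, this]
      rw [hset]
      by_cases hm : (n : Int) ∈ t <;> by_cases hej : (n : Int) = j <;>
        simp [hm, hej]

theorem pvSieveFold (L : List Int) (hL : ∀ i ∈ L, 1 ≤ i) (size : Int) (sv : Array Bool) (n : Nat) :
    (L.foldl (fun sv i => (PySem.List.pyRange (2 * i) size i).foldl (fun s j => s.setIfInBounds j.toNat false) sv) sv).getD n false
      = (sv.getD n false && !(L.any (fun i => decide ((n : Int) ∈ PySem.List.pyRange (2 * i) size i)))) := by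
  induction L generalizing sv with
  | nil => simp
  | cons i t ih =>
      have hi : 1 ≤ i := hL i (List.mem_cons_self ..)
      have ht : ∀ x ∈ t, 1 ≤ x := fun x hx => hL x (List.mem_cons_of_mem _ hx)
      have hnn : ∀ j ∈ PySem.List.pyRange (2 * i) size i, 0 ≤ j := by
        intro j hj
        rw [PySem.List.mem_pyRange_iff_of_pos (by omega)] at hj
        omega
      simp only [List.foldl_cons, ih ht, pvSetFold _ hnn, List.any_cons]
      by_cases h1 : (n : Int) ∈ PySem.List.pyRange (2 * i) size i <;> simp [h1]

-- for 2 ≤ n ≤ r the sieve flag coincides with A's trial-division predicate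
theorem pvSieveB_eq_pvIsP (r n : Int) (h2 : 2 ≤ n) (hr : n ≤ r) :
    (pvSieveB r).getD n.toNat false = pvIsP n := by
  unfold pvSieveB
  have hL : ∀ i ∈ PySem.List.pyRange 2 (r + 1) 1, 1 ≤ i := by
    intro i hi; rw [PySem.List.mem_pyRange_one] at hi; omega
  rw [pvSieveFold _ hL]
  have hinit : (Array.replicate (r + 1).toNat true).getD n.toNat false = true := by
    rw [Array.getD_eq_getD_getElem?, Array.getElem?_replicate]
    have : n.toNat < (r + 1).toNat := by omega
    simp [this]
  rw [hinit, Bool.true_and]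
  have hcast : ((n.toNat : Int)) = n := by omega
  have hdiv : PySem.Int.truncdiv n 2 = n / 2 := by
    simp only [PySem.Int.truncdiv, Int.tdiv_eq_ediv_of_nonneg (by omega : (0:Int) ≤ n)]
  by_cases hp : pvIsP n = true
  · -- no small divisor of n: no write hits index n
    rw [hp]
    rw [pvIsP_iff] at hp
    simp only [Bool.not_eq_true', List.any_eq_false]
    intro i hi hmem
    rw [PySem.List.mem_pyRange_one] at hi
    have hmem' := of_decide_eq_true hmem
    rw [PySem.List.mem_pyRange_iff_of_pos (by omega), hcast] at hmem'
    obtain ⟨hlo, _, hdvd⟩ := hmem'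
    have hdvd' : i ∣ n := by
      have h2i : i ∣ 2 * i := Dvd.intro 2 (by ring)
      simpa using dvd_add hdvd h2i
    have hle : i ≤ PySem.Int.truncdiv n 2 := by
      rw [hdiv]
      have : i ≤ n / 2 := (Int.le_ediv_iff_mul_le (by norm_num : (0:Int) < 2)).mpr (by omega)
      omega
    exact hp i (by omega) (by omega) hdvd'
  · -- n has a divisor i with 2 ≤ i ≤ n/2: the sieve marked n
    rw [Bool.not_eq_true] at hp
    rw [hp]
    have hne := (not_iff_not.mpr (pvIsP_iff n)).mp (by simp [hp])
    simp only [not_forall, not_not] at hne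
    obtain ⟨i, h2i, hlt, hdvd⟩ := hne
    rw [hdiv] at hlt
    have h2in : 2 * i ≤ n := by
      have hle : i ≤ n / 2 := by omega
      have := (Int.le_ediv_iff_mul_le (by norm_num : (0:Int) < 2)).mp hle
      omega
    simp only [Bool.not_eq_false', List.any_eq_true, decide_eq_true_eq]
    refine ⟨i, ?_, ?_⟩
    · rw [PySem.List.mem_pyRange_one]; omega
    · rw [PySem.List.mem_pyRange_iff_of_pos (by omega), hcast]
      exact ⟨by omega, by omega, dvd_sub hdvd (Dvd.intro 2 (by ring))⟩

-- main equality, assembled from the pieces above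
theorem pvMain_eq (s e : Int) : getCousinPrime s e = getCousinPrime_alt s e := by
  rw [getCousinPrime_eq]
  show _ = (if e < 2 ∨ max (if s = 1 then 2 else s) 2 > e then (if (if s = 1 then 2 else s) < 4 ∧ e > 6 then [[3, 7]] else [])
    else (if (if s = 1 then 2 else s) < 4 ∧ e > 6 then [[3, 7]] else []) ++
      pvPairsB ((PySem.List.pyRange (max (if s = 1 then 2 else s) 2) (e + 1) 1).filter
        (fun n => (pvSieveB e).getD n.toNat false)))
  by_cases he : e < 2 ∨ max (if s = 1 then 2 else s) 2 > e
  · rw [if_pos he]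
    rcases he with he | he
    · have hfil : (PySem.List.pyRange (if s = 1 then 2 else s) (e + 1) 1).filter pvIsP
          = PySem.List.pyRange (if s = 1 then 2 else s) (e + 1) 1 := by
        apply List.filter_eq_self.mpr
        intro a ha
        rw [PySem.List.mem_pyRange_one] at ha
        exact pvIsP_of_le_three a (by omega)
      rw [hfil, pvPairs_pyRange (e + 1 - (if s = 1 then 2 else s)).toNat _ _ rfl, List.append_nil]
    · -- empty scan range
      by_cases hp2 : 2 ≤ (if s = 1 then 2 else s)
      · -- start > e: A's loop range is empty too
        rw [max_eq_left hp2] at he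
        rw [PySem.List.pyRange_one_eq_nil (by omega)]
        simp [pvPairs]
      · -- start < 2, so max = 2 > e: everything in A's range is ≤ 1, a gap-1 run
        rw [max_eq_right (by omega)] at he
        have hfil : (PySem.List.pyRange (if s = 1 then 2 else s) (e + 1) 1).filter pvIsP
            = PySem.List.pyRange (if s = 1 then 2 else s) (e + 1) 1 := by
          apply List.filter_eq_self.mpr
          intro a ha
          rw [PySem.List.mem_pyRange_one] at ha
          exact pvIsP_of_le_three a (by omega)
        rw [hfil, pvPairs_pyRange (e + 1 - (if s = 1 then 2 else s)).toNat _ _ rfl, List.append_nil]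
  · rw [if_neg he]
    rw [not_or, not_lt, not_lt] at he
    obtain ⟨he, hle⟩ := he
    rw [pvPairsB_eq]
    have hfil : (PySem.List.pyRange (max (if s = 1 then 2 else s) 2) (e + 1) 1).filter
          (fun n => (pvSieveB e).getD n.toNat false)
        = (PySem.List.pyRange (max (if s = 1 then 2 else s) 2) (e + 1) 1).filter pvIsP := by
      apply List.filter_congr
      intro n hn
      rw [PySem.List.mem_pyRange_one] at hn
      exact pvSieveB_eq_pvIsP e n (by omega) (by omega)
    rw [hfil]
    congr 1
    by_cases hp2 : 2 ≤ (if s = 1 then 2 else s)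
    · rw [max_eq_left hp2]
    · rw [max_eq_right (by omega)]
      rw [PySem.List.pyRange_one_append _ 2 _ (by omega) (by omega), List.filter_append]
      have h1 : (PySem.List.pyRange (if s = 1 then 2 else s) 2 1).filter pvIsP
          = PySem.List.pyRange (if s = 1 then 2 else s) 2 1 := by
        apply List.filter_eq_self.mpr
        intro a ha
        rw [PySem.List.mem_pyRange_one] at ha
        exact pvIsP_of_le_three a (by omega)
      have h2 : (PySem.List.pyRange 2 (e + 1) 1).filter pvIsP
          = 2 :: (PySem.List.pyRange 3 (e + 1) 1).filter pvIsP := by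
        rw [PySem.List.pyRange_one_cons (by omega : (2:Int) < e + 1), List.filter_cons,
          if_pos (by simpa using pvIsP_of_le_three 2 (by norm_num))]
        norm_num
      rw [h1, h2, pvPairs_junction (2 - (if s = 1 then 2 else s)).toNat _ _ rfl, ← h2]

-- ===== VERDICT (by name: the statement is the Claim_ definition above) =====
theorem getCousinPrime_spec : Claim_equal_getCousinPrime := by
  intro s e _
  exact pvMain_eq s e
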